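-- pv_equiv track=rewrite | github.com/EuphoricCatface/PyCellSheet | pyspread/lib/pycellsheet.py | coord_to_spreadsheet_ref
-- ===== SOURCE A (Python) =====
-- def coord_to_spreadsheet_ref(coord: tuple[int, int]) -> str:
--     """Calculate a spreadsheet reference from coordinate tuple
--
--     Uses bijective base-26 numeral system for column letters.
--     Examples: 0 -> A, 25 -> Z, 26 -> AA, 701 -> ZZ
--     """
--     row, col = coord
--
--     # Convert column number to bijective base-26 (A-Z, AA-ZZ, etc.)
--     col += 1  # Convert from 0-based to 1-based
--     col_str = ""
--     while col > 0:
--         col -= 1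
--         col_str = chr(ord('A') + col % 26) + col_str
--         col //= 26
--
--     return col_str + str(row + 1)
-- ===== SOURCE B (Python) =====
-- def coord_to_spreadsheet_ref(coord: tuple[int, int]) -> str:
--     """Calculate a spreadsheet reference from coordinate tuple."""
--     row, col = coord
--     n = col + 1
--     # Phase 1: find the letter count k and `low`, the number of refs shorter than k letters
--     k, low, high = 0, 0, 0
--     while n > high:
--         k += 1
--         low, high = high, high * 26 + 26
--     # Phase 2: fixed-width standard base-26 conversion of the offset within the k-letter block
--     m = n - low - 1
--     letters = []
--     for _ in range(k):
--         letters.append(chr(ord('A') + m % 26))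
--         m //= 26
--     return ''.join(reversed(letters)) + str(row + 1)
-- ===== Notes on version B (the rewrite author's own statement) =====
-- stated objective: alternative
-- what changed: Replaces A's single digit-popping while-loop by a two-phase algorithm: first find the letter count k and the count of shorter references by scanning block boundaries, then do a fixed-width standard base-26 conversion of the offset (no -1 per digit) and reverse the collected letters.
import Mathlib
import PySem

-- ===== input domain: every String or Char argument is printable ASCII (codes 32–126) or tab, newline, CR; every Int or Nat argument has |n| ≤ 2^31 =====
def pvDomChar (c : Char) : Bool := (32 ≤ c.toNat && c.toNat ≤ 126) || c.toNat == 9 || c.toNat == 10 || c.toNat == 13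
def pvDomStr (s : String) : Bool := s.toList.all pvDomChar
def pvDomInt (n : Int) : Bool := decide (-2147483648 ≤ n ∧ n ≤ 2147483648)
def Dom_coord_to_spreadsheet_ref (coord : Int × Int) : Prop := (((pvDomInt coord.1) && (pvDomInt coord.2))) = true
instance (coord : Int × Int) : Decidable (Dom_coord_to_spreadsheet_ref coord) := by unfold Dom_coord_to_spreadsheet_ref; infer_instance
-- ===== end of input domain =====

-- B replaces A's digit-popping while-loop by a two-phase algorithm: find the letter count and block base first, then a fixed-width standard base-26 conversion of the offset; alternative decomposition, same cost.


-- ===== PORT A =====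
-- A's while-loop: decrements col, prepends the letter, floor-divides by 26
def pvALoop (col : Int) (acc : String) : String :=
  if col > 0 then
    -- c := col - 1 inlined
    pvALoop (PySem.Int.floordiv (col - 1) 26)
      (String.ofList [Char.ofNat (65 + (PySem.Int.mod (col - 1) 26)).toNat] ++ acc)
  else acc
termination_by col.toNat
decreasing_by
  have := PySem.Int.floordiv_eq_ediv_of_pos (a := col - 1) (b := 26) (by omega)
  simp only [this]
  omega

def coord_to_spreadsheet_ref (coord : Int × Int) : String :=
  pvALoop (coord.2 + 1) "" ++ PySem.Int.toStr (coord.1 + 1)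

-- ===== PORT B =====
-- B phase 1: `while n > high: k += 1; low, high = high, high*26+26`.
-- low/high are Nats here: exact, since in Source B they start at 0 and only grow.
def pvFindLoop (n : Int) (k low high : Nat) : Nat × Nat :=
  if n > (high : Int) then pvFindLoop n (k + 1) high (high * 26 + 26) else (k, low)
termination_by (n - high).toNat
decreasing_by omega

-- B phase 2: `for _ in range(k): letters.append(chr(ord('A') + m % 26)); m //= 26`
def pvLetters (m : Int) : Nat → List Char
  | 0 => []
  | k + 1 => Char.ofNat (65 + (PySem.Int.mod m 26)).toNat :: pvLetters (PySem.Int.floordiv m 26) k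

def coord_to_spreadsheet_ref_alt (coord : Int × Int) : String :=
  let n := coord.2 + 1
  let r := pvFindLoop n 0 0 0
  let m := n - (r.2 : Int) - 1
  String.ofList (pvLetters m r.1).reverse ++ PySem.Int.toStr (coord.1 + 1)

-- ===== PRECONDITION & SPEC =====
def Spec_coord_to_spreadsheet_ref (coord : Int × Int) (out : String) : Prop := out = coord_to_spreadsheet_ref_alt coord
instance (coord : Int × Int) (out : String) : Decidable (Spec_coord_to_spreadsheet_ref coord out) := by unfold Spec_coord_to_spreadsheet_ref; infer_instance

-- ===== CLAIM (what is proved, stated in full; the proofs are below) =====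
def Claim_equal_coord_to_spreadsheet_ref : Prop := ∀ (coord : Int × Int), Dom_coord_to_spreadsheet_ref coord → Spec_coord_to_spreadsheet_ref coord (coord_to_spreadsheet_ref coord)

-- ===== LEMMAS AND PROOFS =====

-- pvS k = number of references of at most k letters = 26 + 26^2 + … + 26^k
def pvS : Nat → Nat
  | 0 => 0
  | k + 1 => 26 * pvS k + 26

theorem pvS_mono : ∀ {j k : Nat}, j ≤ k → pvS j ≤ pvS k := by
  intro j k h
  induction k, h using Nat.le_induction with
  | base => exact Nat.le_refl _
  | succ m hm ih => exact Nat.le_trans ih (by simp [pvS]; omega)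

theorem pvS_ge_self : ∀ (j : Nat), j ≤ pvS j := by
  intro j
  induction j with
  | zero => omega
  | succ j ih => simp only [pvS]; omega

-- main bridge: on the k-letter block, A's loop produces the reversed fixed-width digits
theorem pvALoop_eq_letters : ∀ (k : Nat) (n : Int) (acc : String),
    (pvS k : Int) < n → n ≤ (pvS (k + 1) : Int) →
    pvALoop n acc = String.ofList (pvLetters (n - (pvS k : Int) - 1) (k + 1)).reverse ++ acc := by
  intro k
  induction k with
  | zero =>
    intro n acc h1 h2
    simp only [pvS] at h1 h2
    push_cast at h1 h2
    rw [pvALoop, if_pos (by omega)]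
    have hd : PySem.Int.floordiv (n - 1) 26 = 0 := by
      rw [PySem.Int.floordiv_eq_ediv_of_pos (by omega)]; omega
    rw [hd, pvALoop, if_neg (by omega)]
    simp only [pvLetters, List.reverse]
    have : n - (pvS 0 : Int) - 1 = n - 1 := by simp [pvS]
    rw [this]
    simp [String.ofList]
  | succ k ih =>
    intro n acc h1 h2
    rw [pvALoop, if_pos (by have := pvS_ge_self (k+1); omega)]
    have h26 : (0 : Int) < 26 := by omega
    have hS1 : (pvS (k + 1) : Int) = 26 * (pvS k : Int) + 26 := by simp only [pvS]; push_cast; ring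
    have hS2 : (pvS (k + 2) : Int) = 26 * (pvS (k+1) : Int) + 26 := by simp only [pvS]; push_cast; ring
    have hfd : PySem.Int.floordiv (n - 1) 26 = (n - 1) / 26 :=
      PySem.Int.floordiv_eq_ediv_of_pos h26
    -- range of the recursive argument
    have hlo : (pvS k : Int) < (n - 1) / 26 := by rw [hS1] at h1; omega
    have hhi : (n - 1) / 26 ≤ (pvS (k + 1) : Int) := by rw [hS2] at h2; omega
    rw [hfd, ih _ _ hlo hhi]
    -- fold the prepended letter into the reversed digit list
    rw [← String.append_assoc, ← String.ofList_append]
    congr 1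
    rw [← List.reverse_cons]
    congr 1
    rw [List.reverse_inj]
    conv_rhs => rw [pvLetters]
    have hm : PySem.Int.mod (n - (pvS (k+1) : Int) - 1) 26 = PySem.Int.mod (n - 1) 26 := by
      rw [PySem.Int.mod_eq_emod_of_pos h26, PySem.Int.mod_eq_emod_of_pos h26, hS1]; omega
    have hq : PySem.Int.floordiv (n - (pvS (k+1) : Int) - 1) 26 = (n-1)/26 - (pvS k : Int) - 1 := by
      rw [PySem.Int.floordiv_eq_ediv_of_pos h26, hS1]; omega
    rw [hm, hq]

-- B's phase-1 loop, started anywhere in its run, ends at the block containing n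
def pvSprev : Nat → Nat
  | 0 => 0
  | j + 1 => pvS j

theorem pvFindLoop_run : ∀ (d j k : Nat) (n : Int), j + d = k + 1 →
    (pvS k : Int) < n → n ≤ (pvS (k + 1) : Int) →
    pvFindLoop n j (pvSprev j) (pvS j) = (k + 1, pvS k) := by
  intro d
  induction d with
  | zero =>
    intro j k n hj h1 h2
    have hj' : j = k + 1 := by omega
    subst hj'
    rw [pvFindLoop, if_neg (by omega)]
    simp [pvSprev]
  | succ d ih =>
    intro j k n hj h1 h2
    have hjk : j ≤ k := by omega
    have hm : pvS j ≤ pvS k := pvS_mono hjk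
    have : (pvS j : Int) < n := by omega
    rw [pvFindLoop, if_pos (by omega)]
    have hs : pvS j * 26 + 26 = pvS (j + 1) := by simp only [pvS]; ring
    rw [hs]
    exact ih (j + 1) k n (by omega) h1 h2

theorem pv_exists_block : ∀ (j : Nat) (n : Int), 0 < n → n ≤ (pvS j : Int) →
    ∃ k, (pvS k : Int) < n ∧ n ≤ (pvS (k + 1) : Int) := by
  intro j
  induction j with
  | zero => intro n h1 h2; simp [pvS] at h2; omega
  | succ j ih =>
    intro n h1 h2
    rcases lt_or_ge (pvS j : Int) n with h | h
    · exact ⟨j, h, h2⟩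
    · exact ih n h1 h

-- ===== VERDICT =====
theorem coord_to_spreadsheet_ref_spec : Claim_equal_coord_to_spreadsheet_ref := by
  intro coord _
  show _ = _
  unfold coord_to_spreadsheet_ref coord_to_spreadsheet_ref_alt
  simp only []
  set n := coord.2 + 1 with hn
  by_cases h : n ≤ 0
  · -- no letters on both sides
    rw [pvALoop, if_neg (by omega)]
    rw [pvFindLoop, if_neg (by omega)]
    rfl
  · replace h : 0 < n := by omega
    obtain ⟨k, h1, h2⟩ := pv_exists_block n.toNat n h (by
      have := pvS_ge_self n.toNat; omega)
    have hf : pvFindLoop n 0 0 0 = (k + 1, pvS k) := by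
      have := pvFindLoop_run (k + 1) 0 k n (by omega) h1 h2
      simpa [pvSprev, pvS] using this
    rw [hf, pvALoop_eq_letters k n _ h1 h2]
    simp
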